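-- pv_equiv track=rewrite | github.com/ZaidQourah2004/CSE231 | Projects/Python/Network Analysis Project/proj08.py | find_max_second_friends
-- ===== SOURCE A (Python) =====
-- def find_max_second_friends(seconds_dict):
--     """
--     This function uses the information from the second friends dictionary and
--     finds the name/s (through key, value pair) with the most second friends
--     using an algorithim. The names list is returned along with the max no, of
--     friends.
--     """
--     max_names = [] # list of names with most second friends
--     maximum = -1 # used to find maximum number of second friends.
--     for key, val in seconds_dict.items(): # checks each item in dict and sees
--     # which one has the highest length for its value in key, value pair.
--         if len(val) > maximum:
--             maximum = len(val)
--     for key, val in seconds_dict.items(): # checks if length of value in key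
--     # value pair is equal to maximum length; if so it is added to list.
--         if len(val) == maximum:
--             max_names.append(key)
--
--     return((max_names, maximum))
-- ===== SOURCE B (Python) =====
-- def find_max_second_friends(seconds_dict):
--     """Single running-maximum pass: reset the name list on a new maximum,
--     append on a tie, instead of A's compute-max-then-filter two passes."""
--     max_names = []
--     maximum = -1
--     for key, val in seconds_dict.items():
--         n = len(val)
--         if n > maximum:
--             maximum = n
--             max_names = [key]
--         elif n == maximum:
--             max_names.append(key)
--     return (max_names, maximum)
-- ===== Notes on version B (the rewrite author's own statement) =====
-- stated objective: simpler
-- what changed: Replaces A's two passes (first find the maximum length, then re-scan to collect the keys attaining it) by one running-maximum pass that resets the name list on a strictly larger length and appends on a tie.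
import Mathlib
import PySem

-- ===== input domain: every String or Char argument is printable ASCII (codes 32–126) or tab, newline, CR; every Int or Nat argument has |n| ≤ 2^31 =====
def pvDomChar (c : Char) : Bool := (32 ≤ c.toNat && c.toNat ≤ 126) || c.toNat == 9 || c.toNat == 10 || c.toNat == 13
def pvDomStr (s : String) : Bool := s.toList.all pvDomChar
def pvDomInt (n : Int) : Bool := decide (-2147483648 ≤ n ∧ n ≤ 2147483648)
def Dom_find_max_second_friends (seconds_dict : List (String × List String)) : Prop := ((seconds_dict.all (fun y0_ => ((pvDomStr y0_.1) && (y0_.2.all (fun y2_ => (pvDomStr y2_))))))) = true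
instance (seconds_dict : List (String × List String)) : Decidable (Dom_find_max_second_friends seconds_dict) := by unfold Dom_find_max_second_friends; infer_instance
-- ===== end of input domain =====

-- B replaces A's two-pass (max, then filter) scan by one running-maximum pass (simpler, same O(n) cost).


-- ===== PORT A =====
-- first loop: running maximum of len(val), started at -1
def aMaxStep (m : Int) (kv : String × List String) : Int :=
  if (kv.2.length : Int) > m then (kv.2.length : Int) else m

-- second loop: collect keys whose value length equals the target t
def aCollect (t : Int) (acc : List String) (kv : String × List String) : List String :=
  if (kv.2.length : Int) = t then acc ++ [kv.1] else acc

def find_max_second_friends (seconds_dict : List (String × List String)) : List String × Int :=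
  let maximum := seconds_dict.foldl aMaxStep (-1)
  let max_names := seconds_dict.foldl (aCollect maximum) []
  (max_names, maximum)

-- ===== PORT B =====
-- one pass: reset names on a strictly larger length, append on a tie
def bStep (st : List String × Int) (kv : String × List String) : List String × Int :=
  let n : Int := kv.2.length
  if n > st.2 then ([kv.1], n)
  else if n = st.2 then (st.1 ++ [kv.1], st.2)
  else st

def find_max_second_friends_alt (seconds_dict : List (String × List String)) : List String × Int :=
  seconds_dict.foldl bStep ([], -1)

-- ===== PRECONDITION & SPEC =====
def Spec_find_max_second_friends (seconds_dict : List (String × List String)) (out : List String × Int) : Prop := out = find_max_second_friends_alt seconds_dict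
instance (seconds_dict : List (String × List String)) (out : List String × Int) : Decidable (Spec_find_max_second_friends seconds_dict out) := by unfold Spec_find_max_second_friends; infer_instance

-- ===== CLAIM (what is proved, stated in full; the proofs are below) =====
def Claim_equal_find_max_second_friends : Prop := ∀ (seconds_dict : List (String × List String)), Dom_find_max_second_friends seconds_dict → Spec_find_max_second_friends seconds_dict (find_max_second_friends seconds_dict)

-- ===== LEMMAS AND PROOFS =====

-- the running maximum never decreases below its start
theorem aMax_ge : ∀ (l : List (String × List String)) (m : Int), m ≤ l.foldl aMaxStep m := by
  intro l
  induction l with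
  | nil => intro m; simp [List.foldl]
  | cons kv t ih =>
    intro m
    have h1 : m ≤ aMaxStep m kv := by unfold aMaxStep; split_ifs with h <;> omega
    exact le_trans h1 (ih (aMaxStep m kv))

-- the collecting fold factors through its accumulator
theorem aCollect_shift : ∀ (l : List (String × List String)) (t : Int) (acc : List String),
    l.foldl (aCollect t) acc = acc ++ l.foldl (aCollect t) [] := by
  intro l
  induction l with
  | nil => intro t acc; simp [List.foldl]
  | cons kv tl ih =>
    intro t acc
    simp only [List.foldl]
    rw [ih t (aCollect t acc kv), ih t (aCollect t [] kv)]
    unfold aCollect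
    split_ifs <;> simp

-- main invariant: B's single fold from (acc, m) is A's filter against the final maximum,
-- with acc kept exactly when the maximum does not increase
theorem bStep_inv : ∀ (l : List (String × List String)) (acc : List String) (m : Int),
    l.foldl bStep (acc, m) =
      ((if l.foldl aMaxStep m = m then acc else []) ++ l.foldl (aCollect (l.foldl aMaxStep m)) [],
       l.foldl aMaxStep m) := by
  intro l
  induction l with
  | nil => intro acc m; simp [List.foldl]
  | cons kv t ih =>
    intro acc m
    have hge : ∀ m' : Int, m' ≤ t.foldl aMaxStep m' := fun m' => aMax_ge t m'
    simp only [List.foldl]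
    by_cases h1 : ((kv.2.length : Int) > m)
    · -- strict increase: B resets to ([kv.1], n)
      have hstep : bStep (acc, m) kv = ([kv.1], (kv.2.length : Int)) := by
        unfold bStep; simp [h1]
      have hmax : aMaxStep m kv = (kv.2.length : Int) := by unfold aMaxStep; simp [h1]
      rw [hstep]
      simp only [hmax]
      rw [ih [kv.1] (kv.2.length : Int)]
      have hM := hge (kv.2.length : Int)
      by_cases h2 : t.foldl aMaxStep (kv.2.length : Int) = (kv.2.length : Int)
      · -- kv attains the final maximum: it is the first collected key
        have hc : aCollect (t.foldl aMaxStep (kv.2.length : Int)) [] kv = [kv.1] := by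
          unfold aCollect; simp [h2]
        rw [aCollect_shift t _ (aCollect _ [] kv), hc]
        simp only [h2, Prod.mk.injEq, and_true]
        have : ¬ ((kv.2.length : Int) = m) := by omega
        simp [this]
      · -- a later element is strictly larger: kv is not collected
        have hc : aCollect (t.foldl aMaxStep (kv.2.length : Int)) [] kv = [] := by
          unfold aCollect
          have : ¬ ((kv.2.length : Int) = t.foldl aMaxStep (kv.2.length : Int)) := fun h => h2 h.symm
          simp [this]
        rw [aCollect_shift t _ (aCollect _ [] kv), hc]
        have : ¬ (t.foldl aMaxStep (kv.2.length : Int) = m) := by omega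
        simp [this, h2]
    · -- no increase of the running maximum
      have hmax : aMaxStep m kv = m := by unfold aMaxStep; simp [h1]
      simp only [hmax]
      have hM := hge m
      by_cases h2 : ((kv.2.length : Int) = m)
      · -- tie with the running maximum: B appends kv.1
        have hstep : bStep (acc, m) kv = (acc ++ [kv.1], m) := by
          unfold bStep; simp [h2]
        rw [hstep, ih (acc ++ [kv.1]) m]
        by_cases h3 : t.foldl aMaxStep m = m
        · have hc : aCollect (t.foldl aMaxStep m) [] kv = [kv.1] := by
            unfold aCollect; simp [h2, h3]
          rw [aCollect_shift t _ (aCollect _ [] kv), hc]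
          simp [h3]
        · have hc : aCollect (t.foldl aMaxStep m) [] kv = [] := by
            unfold aCollect
            have : ¬ ((kv.2.length : Int) = t.foldl aMaxStep m) := by rw [h2]; exact fun h => h3 h.symm
            simp [this]
          rw [aCollect_shift t _ (aCollect _ [] kv), hc]
          simp [h3]
      · -- strictly smaller: B ignores kv
        have hstep : bStep (acc, m) kv = (acc, m) := by
          unfold bStep; simp [h1, h2]
        rw [hstep, ih acc m]
        have hc : aCollect (t.foldl aMaxStep m) [] kv = [] := by
          unfold aCollect
          have : ¬ ((kv.2.length : Int) = t.foldl aMaxStep m) := by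
            intro h; omega
          simp [this]
        rw [aCollect_shift t _ (aCollect _ [] kv), hc]
        simp

-- ===== VERDICT (by name: the statement is the Claim_ definition above) =====
theorem find_max_second_friends_spec : Claim_equal_find_max_second_friends := by
  intro l _
  unfold Spec_find_max_second_friends find_max_second_friends find_max_second_friends_alt
  rw [bStep_inv l [] (-1)]
  split_ifs <;> simp
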